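-- pv_equiv track=rewrite | github.com/magnetrwn/NetHang | nc-hangman.py | string_to_masked
-- ===== SOURCE A (Python) =====
-- def string_to_masked(string, to_show):
--   '''Return the input string wrapped, colorized and masked.'''
--   out = ''
--   for i in range(len(string)):
--     if i%48 == 0:
--       out += '\n'
--     if string[i] in to_show or not string[i].isalpha():
--       out += '\x1B[01;36m'+string[i]+'\x1B[0m'
--     else:
--       out += '.'
--   return out
-- ===== SOURCE B (Python) =====
-- def string_to_masked(string, to_show):
--   '''Return the input string wrapped, colorized and masked.'''
--   toks = ['\x1B[01;36m' + c + '\x1B[0m' if c in to_show or not c.isalpha() else '.'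
--           for c in string]
--   return ''.join('\n' + ''.join(toks[i:i + 48]) for i in range(0, len(toks), 48))
-- ===== Notes on version B (the rewrite author's own statement) =====
-- stated objective: alternative
-- what changed: Replaced the single positional loop with index-mod-48 newline logic by a two-phase pipeline: a pure per-character map to masked/colorized tokens (no positional logic), then chunking the token list into groups of 48 and joining each chunk behind a newline.
import Mathlib
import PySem

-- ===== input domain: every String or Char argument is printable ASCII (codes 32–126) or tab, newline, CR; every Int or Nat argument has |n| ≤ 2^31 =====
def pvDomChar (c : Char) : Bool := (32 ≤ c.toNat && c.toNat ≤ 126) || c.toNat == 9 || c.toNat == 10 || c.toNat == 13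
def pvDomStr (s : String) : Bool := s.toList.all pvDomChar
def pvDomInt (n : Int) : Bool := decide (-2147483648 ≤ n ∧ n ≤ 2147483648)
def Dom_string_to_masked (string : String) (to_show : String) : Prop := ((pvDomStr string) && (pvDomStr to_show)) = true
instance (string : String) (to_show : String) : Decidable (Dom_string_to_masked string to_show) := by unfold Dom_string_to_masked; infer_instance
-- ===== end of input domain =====

-- B is an alternative decomposition (map to tokens, then chunk by 48); same return value as A.

-- ===== PORT A =====
-- A: one positional loop over range(len(string)); newline when i % 48 == 0.
def string_to_masked (string : String) (to_show : String) : String :=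
  String.mk ((PySem.List.enumerate string.toList 0).foldl
    (fun out ic =>
      let out := if PySem.Int.mod ic.1 48 == 0 then out ++ ['\n'] else out
      if PySem.Chars.isIn [ic.2] to_show.toList || !(PySem.Chars.isalpha ic.2) then
        out ++ ("\x1B[01;36m".toList ++ [ic.2] ++ "\x1B[0m".toList)
      else
        out ++ ['.'])
    [])

-- ===== PORT B =====
-- B helper: per-character token, no positional logic.
def pvTok (to_show : List Char) (c : Char) : List Char :=
  if PySem.Chars.isIn [c] to_show || !(PySem.Chars.isalpha c) then
    "\x1B[01;36m".toList ++ [c] ++ "\x1B[0m".toList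
  else
    ['.']

-- B helper: chunk the token list into groups of 48, each chunk behind a newline.
def pvRenderChunks (toks : List (List Char)) : List Char :=
  if toks = [] then []
  else '\n' :: (toks.take 48).flatten ++ pvRenderChunks (toks.drop 48)
termination_by toks.length
decreasing_by
  rename_i h
  have := List.length_pos_of_ne_nil h
  simp only [List.length_drop]; omega

def string_to_masked_alt (string : String) (to_show : String) : String :=
  String.mk (pvRenderChunks (string.toList.map (pvTok to_show.toList)))

-- ===== PRECONDITION & SPEC =====
def Spec_string_to_masked (string : String) (to_show : String) (out : String) : Prop := out = string_to_masked_alt string to_show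
instance (string : String) (to_show : String) (out : String) : Decidable (Spec_string_to_masked string to_show out) := by unfold Spec_string_to_masked; infer_instance

-- ===== CLAIM (what is proved, stated in full; the proofs are below) =====
def Claim_equal_string_to_masked : Prop := ∀ (string : String) (to_show : String), Dom_string_to_masked string to_show → Spec_string_to_masked string to_show (string_to_masked string to_show)

-- ===== LEMMAS AND PROOFS =====

-- A's loop body as a flatMap step.
def pvStep (ts : List Char) (ic : Int × Char) : List Char :=
  (if PySem.Int.mod ic.1 48 == 0 then ['\n'] else []) ++ pvTok ts ic.2

theorem pvA_eq_flatMap (string to_show : String) :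
    string_to_masked string to_show =
      String.mk ((PySem.List.enumerate string.toList 0).flatMap (pvStep to_show.toList)) := by
  unfold string_to_masked
  congr 1
  have h : ∀ (l : List (Int × Char)) (acc : List Char),
      l.foldl (fun out ic =>
        let out := if PySem.Int.mod ic.1 48 == 0 then out ++ ['\n'] else out
        if PySem.Chars.isIn [ic.2] to_show.toList || !(PySem.Chars.isalpha ic.2) then
          out ++ ("\x1B[01;36m".toList ++ [ic.2] ++ "\x1B[0m".toList)
        else
          out ++ ['.']) acc = acc ++ l.flatMap (pvStep to_show.toList) := by
    intro l
    induction l with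
    | nil => simp
    | cons ic l ih =>
      intro acc
      simp only [List.foldl_cons, List.flatMap_cons, ih]
      simp only [pvStep, pvTok]
      split <;> split <;> simp
  exact h _ []

-- shift the enumeration start by 48: the step only looks at the index mod 48
theorem pvShift (ts : List Char) (l : List Char) (s : Int) :
    (PySem.List.enumerate l (s + 48)).flatMap (pvStep ts) =
    (PySem.List.enumerate l s).flatMap (pvStep ts) := by
  induction l generalizing s with
  | nil => simp [PySem.List.enumerate_nil]
  | cons c l ih =>
    simp only [PySem.List.enumerate_cons, List.flatMap_cons]
    have h48 : PySem.Int.mod (s + 48) 48 = PySem.Int.mod s 48 := by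
      simp only [PySem.Int.mod, Int.fmod_eq_emod]; omega
    have : s + 48 + 1 = (s + 1) + 48 := by ring
    rw [this, ih]
    simp [pvStep, h48]

-- a tail of a chunk (indices s..s+len-1 with 1 ≤ s and s+len ≤ 48): no newline is emitted
theorem pvNoNewline (ts : List Char) (l : List Char) (s : Int)
    (h1 : 1 ≤ s) (h2 : s + l.length ≤ 48) :
    (PySem.List.enumerate l s).flatMap (pvStep ts) = (l.map (pvTok ts)).flatten := by
  induction l generalizing s with
  | nil => simp [PySem.List.enumerate_nil]
  | cons c l ih =>
    have h2' : s + (l.length : Int) + 1 ≤ 48 := by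
      simp only [List.length_cons] at h2; push_cast at h2; omega
    have hmod : PySem.Int.mod s 48 = s := by
      simp only [PySem.Int.mod, Int.fmod_eq_emod]
      rw [if_pos (Or.inl (by norm_num))]
      have := Int.emod_eq_of_lt (a := s) (b := 48) (by omega) (by omega)
      omega
    simp only [PySem.List.enumerate_cons, List.flatMap_cons, List.map_cons, List.flatten_cons]
    rw [ih (s + 1) (by omega) (by omega)]
    have hne : (PySem.Int.mod s 48 == 0) = false := by
      rw [hmod]; simp only [beq_eq_false_iff_ne, ne_eq]; omega
    simp only [pvStep, hne, Bool.false_eq_true, if_false, List.nil_append]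

theorem pvMain (ts : List Char) (l : List Char) :
    (PySem.List.enumerate l 0).flatMap (pvStep ts) = pvRenderChunks (l.map (pvTok ts)) := by
  have key : ∀ (n : Nat) (l : List Char), l.length ≤ n →
      (PySem.List.enumerate l 0).flatMap (pvStep ts) = pvRenderChunks (l.map (pvTok ts)) := by
    intro n
    induction n with
    | zero =>
      intro l h
      have : l = [] := List.eq_nil_of_length_eq_zero (Nat.le_zero.mp h)
      subst this
      simp [PySem.List.enumerate_nil, pvRenderChunks]
    | succ n ih =>
      intro l h
      cases l with
      | nil => simp [PySem.List.enumerate_nil, pvRenderChunks]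
      | cons c l' =>
        -- split into the first chunk (48 chars) and the rest
        have hsplit : c :: l' = (c :: l').take 48 ++ (c :: l').drop 48 :=
          (List.take_append_drop 48 (c :: l')).symm
        have htake : (c :: l').take 48 = c :: l'.take 47 := rfl
        -- first chunk
        have hfirst : ((PySem.List.enumerate ((c :: l').take 48) 0).flatMap (pvStep ts)) =
            '\n' :: (((c :: l').take 48).map (pvTok ts)).flatten := by
          rw [htake]
          simp only [PySem.List.enumerate_cons, List.flatMap_cons, List.map_cons,
            List.flatten_cons]
          rw [show ((0 : Int) + 1) = 1 by norm_num]
          rw [pvNoNewline ts (l'.take 47) 1 le_rfl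
            (by have := List.length_take_le 47 l'; omega)]
          have h0 : PySem.Int.mod 0 48 = 0 := by decide
          simp only [pvStep, h0]
          simp
        -- rest of the string
        have hrest : ((PySem.List.enumerate ((c :: l').drop 48) (0 + ((c :: l').take 48).length)).flatMap (pvStep ts)) =
            pvRenderChunks (((c :: l').drop 48).map (pvTok ts)) := by
          by_cases hd : (c :: l').drop 48 = []
          · rw [hd]
            simp [PySem.List.enumerate_nil, pvRenderChunks]
          · have hgt : 48 < (c :: l').length := by
              by_contra hle
              rw [not_lt] at hle
              exact hd (List.drop_eq_nil_of_le hle)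
            have hlen48 : ((c :: l').take 48).length = 48 := by
              rw [List.length_take]; omega
            rw [hlen48]
            have : ((0 : Int) + (48 : Nat)) = 0 + 48 := by norm_num
            rw [this, pvShift]
            exact ih _ (by
              rw [List.length_drop]
              omega)
        -- put the pieces together against B's chunk recursion
        have hne : (c :: l').map (pvTok ts) ≠ [] := by simp
        have hB : pvRenderChunks ((c :: l').map (pvTok ts)) =
            '\n' :: ((((c :: l').take 48).map (pvTok ts)).flatten ++
              pvRenderChunks (((c :: l').drop 48).map (pvTok ts))) := by
          rw [pvRenderChunks, if_neg hne]
          rw [List.map_take, List.map_drop]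
          simp
        conv_lhs => rw [hsplit]
        rw [PySem.List.enumerate_append, List.flatMap_append, hfirst, hrest, hB]
        simp
  exact key l.length l le_rfl

-- ===== VERDICT (by name: the statement is the Claim_ definition above) =====
theorem string_to_masked_spec : Claim_equal_string_to_masked := by
  intro string to_show _
  unfold Spec_string_to_masked string_to_masked_alt
  rw [pvA_eq_flatMap, pvMain]
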